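-- pv_equiv track=rewrite | github.com/adalfarus/Home-Romee-Server | frontend_server/src/analyze.py | calc_longest_streak
-- ===== SOURCE A (Python) =====
-- def calc_longest_streak(sessions, main_idx):
--     max_streak = streak = 0
--     for session in sessions:
--         for game in session:
--             if game[main_idx] == 0:
--                 streak += 1
--                 max_streak = max(max_streak, streak)
--             else:
--                 streak = 0
--     return max_streak
-- ===== SOURCE B (Python) =====
-- def calc_longest_streak(sessions, main_idx):
--     vals = [game[main_idx] for session in sessions for game in session]
--     barriers = [-1] + [i for i, v in enumerate(vals) if v != 0] + [len(vals)]
--     return max(b - a - 1 for a, b in zip(barriers, barriers[1:]))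
-- ===== Notes on version B (the rewrite author's own statement) =====
-- stated objective: alternative
-- what changed: B flattens the values, collects the positions of nonzero entries as 'barriers' (with sentinels -1 and len), and returns the maximum gap between consecutive barriers minus one, instead of A's running streak counter with resets and a running max.
import Mathlib
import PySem

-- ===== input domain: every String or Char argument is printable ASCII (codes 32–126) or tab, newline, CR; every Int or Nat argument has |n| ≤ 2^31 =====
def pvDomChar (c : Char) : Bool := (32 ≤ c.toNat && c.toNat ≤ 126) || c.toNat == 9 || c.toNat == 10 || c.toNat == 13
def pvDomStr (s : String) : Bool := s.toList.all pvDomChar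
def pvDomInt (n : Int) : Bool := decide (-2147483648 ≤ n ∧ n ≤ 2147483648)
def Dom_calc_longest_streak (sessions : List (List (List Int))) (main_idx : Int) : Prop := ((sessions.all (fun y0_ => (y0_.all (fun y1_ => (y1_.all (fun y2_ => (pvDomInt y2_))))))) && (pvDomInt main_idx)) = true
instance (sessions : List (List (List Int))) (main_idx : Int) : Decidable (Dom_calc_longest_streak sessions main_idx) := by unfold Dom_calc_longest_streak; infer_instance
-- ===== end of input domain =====

-- B flattens the values, collects the positions of nonzero entries as barriers (with
-- sentinels -1 and len) and returns the maximum gap between consecutive barriers minus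
-- one, instead of A's running streak counter with resets; same cost.

-- ===== PORT A =====
-- A: nested for-loops carrying (max_streak, streak); game[main_idx] ported with pyGetD
-- (exact under Pre_, which guarantees the index is in range for every game).
def calc_longest_streak (sessions : List (List (List Int))) (main_idx : Int) : Int :=
  (sessions.foldl
    (fun (acc : Int × Int) session =>
      session.foldl
        (fun (acc : Int × Int) game =>
          if PySem.List.pyGetD game main_idx 0 = 0 then
            (max acc.1 (acc.2 + 1), acc.2 + 1)
          else
            (acc.1, 0))
        acc)
    (0, 0)).1

-- ===== PORT B =====
-- max over a nonempty Python generator, ported as head-seeded foldl (the generator in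
-- Source B is never empty: barriers always has at least the two sentinels).
def pvMaxOf : List Int → Int
  | [] => 0
  | d :: ds => ds.foldl max d

def calc_longest_streak_alt (sessions : List (List (List Int))) (main_idx : Int) : Int :=
  let vals := sessions.flatMap (fun session =>
    session.map (fun game => PySem.List.pyGetD game main_idx 0))
  let barriers := (-1 : Int) ::
    ((PySem.List.enumerate vals).filterMap
      (fun p => if p.2 ≠ 0 then some p.1 else none)) ++ [(vals.length : Int)]
  pvMaxOf ((barriers.zip barriers.tail).map (fun p => p.2 - p.1 - 1))

-- ===== PRECONDITION & SPEC =====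
-- Pre_: the Python raises IndexError when main_idx is out of range for some game.
def Pre_calc_longest_streak (sessions : List (List (List Int))) (main_idx : Int) : Prop :=
  ∀ session ∈ sessions, ∀ game ∈ session, PySem.Raise.InRange game.length main_idx

instance (sessions : List (List (List Int))) (main_idx : Int) : Decidable (Pre_calc_longest_streak sessions main_idx) := by unfold Pre_calc_longest_streak; infer_instance

def pvWitness_calc_longest_streak : List (List (List Int)) × Int :=
  ([[[0, 3], [0, 1]], [[1, 0]], [[0, 2], [0, 5], [0, 7]]], 0)

def Spec_calc_longest_streak (sessions : List (List (List Int))) (main_idx : Int) (out : Int) : Prop := out = calc_longest_streak_alt sessions main_idx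
instance (sessions : List (List (List Int))) (main_idx : Int) (out : Int) : Decidable (Spec_calc_longest_streak sessions main_idx out) := by unfold Spec_calc_longest_streak; infer_instance

-- ===== CLAIM (what is proved, stated in full; the proofs are below) =====
def Claim_equal_calc_longest_streak : Prop := ∀ (sessions : List (List (List Int))) (main_idx : Int), Dom_calc_longest_streak sessions main_idx → Pre_calc_longest_streak sessions main_idx → Spec_calc_longest_streak sessions main_idx (calc_longest_streak sessions main_idx)

-- ===== LEMMAS AND PROOFS =====

-- A's step over a single flattened value
def pvStep (acc : Int × Int) (v : Int) : Int × Int :=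
  if v = 0 then (max acc.1 (acc.2 + 1), acc.2 + 1) else (acc.1, 0)

-- "best streak reached while processing the list, the current streak being s"
def pvBest (s : Int) : List Int → Int
  | [] => 0
  | v :: vs => if v = 0 then max (s + 1) (pvBest (s + 1) vs) else pvBest 0 vs

-- indices (starting from k) of the nonzero entries
def pvNz : List Int → Int → List Int
  | [], _ => []
  | x :: xs, k => if x ≠ 0 then k :: pvNz xs (k + 1) else pvNz xs (k + 1)

-- max over the gaps between consecutive barriers prev :: l ++ [n], minus one each
def pvGaps (prev : Int) : List Int → Int → Int
  | [], n => n - prev - 1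
  | x :: xs, n => max (x - prev - 1) (pvGaps x xs n)

theorem pvFoldl_max_shift (l : List Int) : ∀ a b : Int,
    l.foldl max (max a b) = max a (l.foldl max b) := by
  induction l with
  | nil => intro a b; simp
  | cons x xs ih =>
    intro a b
    simp only [List.foldl_cons]
    rw [max_assoc, ih]

theorem pvMaxOf_cons (a : Int) (L : List Int) (h : L ≠ []) :
    pvMaxOf (a :: L) = max a (pvMaxOf L) := by
  cases L with
  | nil => exact absurd rfl h
  | cons d ds =>
    simp only [pvMaxOf, List.foldl_cons]
    exact pvFoldl_max_shift ds a d

-- A's fold in terms of pvBest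
theorem pvFold_eq_best (vs : List Int) : ∀ ms s : Int, 0 ≤ ms → 0 ≤ s →
    (vs.foldl pvStep (ms, s)).1 = max ms (pvBest s vs) := by
  induction vs with
  | nil => intro ms s hm _; simp [pvBest]; omega
  | cons v vs ih =>
    intro ms s hm hs
    simp only [List.foldl_cons, pvStep, pvBest]
    by_cases hv : v = 0
    · simp only [if_pos hv]
      rw [ih (max ms (s + 1)) (s + 1) (by omega) (by omega)]
      rw [max_assoc]
    · simp only [if_neg hv]
      exact ih ms 0 hm le_rfl

theorem pvBest_nonneg (vs : List Int) : ∀ s : Int, 0 ≤ s → 0 ≤ pvBest s vs := by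
  induction vs with
  | nil => intro s _; simp [pvBest]
  | cons v vs ih =>
    intro s hs
    simp only [pvBest]
    by_cases hv : v = 0
    · simp only [if_pos hv]
      have := le_max_left (s + 1) (pvBest (s + 1) vs)
      omega
    · simp only [if_neg hv]
      exact ih 0 le_rfl

-- the enumerate-filterMap of Source B is pvNz
theorem pvEnum_nz (vs : List Int) : ∀ k : Int,
    (PySem.List.enumerate vs k).filterMap
      (fun p => if p.2 ≠ 0 then some p.1 else none) = pvNz vs k := by
  induction vs with
  | nil => intro k; simp [PySem.List.enumerate_nil, pvNz]
  | cons v vs ih =>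
    intro k
    rw [PySem.List.enumerate_cons, List.filterMap_cons]
    by_cases hv : v = 0
    · rw [if_neg (show ¬(((k, v) : Int × Int).2 ≠ 0) by simp [hv])]
      show List.filterMap (fun p : Int × Int => if p.2 ≠ 0 then some p.1 else none)
          (PySem.List.enumerate vs (k + 1)) = pvNz (v :: vs) k
      rw [ih (k + 1)]
      simp [pvNz, hv]
    · rw [if_pos (show (((k, v) : Int × Int).2 ≠ 0) from hv)]
      show k :: List.filterMap (fun p : Int × Int => if p.2 ≠ 0 then some p.1 else none)
          (PySem.List.enumerate vs (k + 1)) = pvNz (v :: vs) k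
      rw [ih (k + 1)]
      simp [pvNz, hv]

-- the zip-of-adjacent-barriers max of Source B is pvGaps
theorem pvZip_gaps (l : List Int) : ∀ prev n : Int,
    pvMaxOf ((((prev :: (l ++ [n])).zip (l ++ [n])).map (fun p => p.2 - p.1 - 1)))
      = pvGaps prev l n := by
  induction l with
  | nil => intro prev n; simp [pvMaxOf, pvGaps]
  | cons x xs ih =>
    intro prev n
    have hne : (((x :: (xs ++ [n])).zip (xs ++ [n])).map
        (fun p : Int × Int => p.2 - p.1 - 1)) ≠ [] := by
      cases xs <;> simp
    simp only [List.cons_append, List.zip_cons_cons, List.map_cons]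
    rw [pvMaxOf_cons _ _ hne, ih x n]
    simp [pvGaps]

-- the barrier-gap value equals the best-streak value
theorem pvGaps_eq_best (vs : List Int) : ∀ s k : Int, 0 ≤ s →
    pvGaps (k - 1 - s) (pvNz vs k) (k + vs.length) = max s (pvBest s vs) := by
  induction vs with
  | nil => intro s k hs; simp [pvNz, pvGaps, pvBest]; omega
  | cons v vs ih =>
    intro s k hs
    simp only [pvNz, pvBest, List.length_cons]
    by_cases hv : v = 0
    · simp only [hv, ne_eq, not_true_eq_false, if_false, reduceIte]
      have hprev : k - 1 - s = (k + 1) - 1 - (s + 1) := by ring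
      have := ih (s + 1) (k + 1) (by omega)
      push_cast
      rw [hprev, show k + ((vs.length : Int) + 1) = (k + 1) + (vs.length : Int) by ring, this]
      have h1 := le_max_left (s + 1) (pvBest (s + 1) vs)
      omega
    · simp only [hv, ne_eq, not_false_eq_true, if_true, reduceIte, pvGaps]
      have := ih 0 (k + 1) le_rfl
      simp only [show (k + 1) - 1 - 0 = k by ring] at this
      push_cast
      rw [show k + ((vs.length : Int) + 1) = (k + 1) + (vs.length : Int) by ring, this]
      have hb := pvBest_nonneg vs 0 le_rfl
      have hs' : k - (k - 1 - s) - 1 = s := by ring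
      rw [hs']
      omega

-- nested foldl of A = foldl over the flattened value list
theorem pvNested_eq_flat (sessions : List (List (List Int))) (main_idx : Int) :
    ∀ acc : Int × Int,
    sessions.foldl
      (fun acc session => session.foldl
        (fun acc game =>
          if PySem.List.pyGetD game main_idx 0 = 0 then
            (max acc.1 (acc.2 + 1), acc.2 + 1)
          else (acc.1, 0)) acc) acc
    = (sessions.flatMap (fun session =>
        session.map (fun game => PySem.List.pyGetD game main_idx 0))).foldl pvStep acc := by
  induction sessions with
  | nil => intro acc; simp
  | cons s ss ih =>
    intro acc
    simp only [List.foldl_cons, List.flatMap_cons, List.foldl_append, List.foldl_map, ih]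
    rfl

-- B's whole pipeline on a flattened value list, in terms of pvBest
theorem pvB_core (vals : List Int) :
    pvMaxOf (((((-1 : Int) ::
        (((PySem.List.enumerate vals).filterMap
          (fun p => if p.2 ≠ 0 then some p.1 else none)) ++ [(vals.length : Int)])).zip
        ((((PySem.List.enumerate vals).filterMap
          (fun p => if p.2 ≠ 0 then some p.1 else none)) ++ [(vals.length : Int)]))).map
        (fun p => p.2 - p.1 - 1))) = max 0 (pvBest 0 vals) := by
  rw [pvEnum_nz, pvZip_gaps]
  have h := pvGaps_eq_best vals 0 0 le_rfl
  have h1 : (0 : Int) - 1 - 0 = -1 := by ring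
  have h2 : (0 : Int) + (vals.length : Int) = (vals.length : Int) := by ring
  rw [h1, h2] at h
  exact h

-- ===== VERDICT (by name: the statement is the Claim_ definition above) =====
theorem calc_longest_streak_spec : Claim_equal_calc_longest_streak := by
  intro sessions main_idx _ _
  unfold Spec_calc_longest_streak calc_longest_streak calc_longest_streak_alt
  rw [pvNested_eq_flat]
  rw [pvFold_eq_best _ 0 0 le_rfl le_rfl]
  exact (pvB_core _).symm
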